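-- pv_equiv track=rewrite | github.com/alessandrofd/leetcode-python | 520c-detect-capital.py | detectCapitalUse_character
-- ===== SOURCE A (Python) =====
-- def detectCapitalUse_character(word: str) -> bool:
--     if len(word) == 1:
--         return True
--
--     start = 0 if word[0].islower() else 1
--     right_case = word[start].islower()
--
--     for i in range(start + 1, len(word)):
--         if word[i].islower() != right_case:
--             return False
--
--     return True
-- ===== SOURCE B (Python) =====
-- def detectCapitalUse_character(word: str) -> bool:
--     n = len(word)
--     if n == 1:
--         return True
--     low = sum(c.islower() for c in word)
--     if word[0].islower():
--         return low == n
--     return low == 0 or low == n - 1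
-- ===== Notes on version B (the rewrite author's own statement) =====
-- stated objective: alternative
-- what changed: Replaces A's reference-case comparison with an early-exit scan by a single lowercase count compared against thresholds (low==n when the first char is lowercase, low==0 or low==n-1 otherwise); Pre_ excludes only the empty string, on which A raises IndexError.
import Mathlib
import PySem

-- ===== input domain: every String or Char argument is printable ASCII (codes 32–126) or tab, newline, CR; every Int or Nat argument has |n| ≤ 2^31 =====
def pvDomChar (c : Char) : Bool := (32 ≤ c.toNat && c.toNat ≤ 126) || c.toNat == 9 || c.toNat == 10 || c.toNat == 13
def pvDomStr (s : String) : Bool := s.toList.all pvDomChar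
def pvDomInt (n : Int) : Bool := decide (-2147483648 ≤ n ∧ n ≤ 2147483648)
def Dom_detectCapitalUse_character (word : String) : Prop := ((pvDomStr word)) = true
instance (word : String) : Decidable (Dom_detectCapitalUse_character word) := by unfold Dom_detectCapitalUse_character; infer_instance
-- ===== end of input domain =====

-- B replaces A's reference-case scan with one lowercase count compared against thresholds (alternative decomposition, same cost).

-- ===== PORT A =====
-- the `for i in range(start+1, len(word))` early-exit loop, over the suffix word[start+1:]
def pvACheck (rc : Bool) : List Char → Bool
  | [] => true
  | c :: rest => if PySem.Chars.islower c != rc then false else pvACheck rc rest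

def detectCapitalUse_character (word : String) : Bool :=
  let cs := word.toList
  if cs.length = 1 then true
  else
    let start : Nat := if PySem.Chars.islower (cs.getD 0 ' ') then 0 else 1
    let rightCase := PySem.Chars.islower (cs.getD start ' ')
    pvACheck rightCase (cs.drop (start + 1))

-- ===== PORT B =====
def detectCapitalUse_character_alt (word : String) : Bool :=
  let cs := word.toList
  let n := cs.length
  if n = 1 then true
  else
    let low := cs.foldl (fun acc c => acc + (if PySem.Chars.islower c then 1 else 0)) 0
    if PySem.Chars.islower (cs.getD 0 ' ') then low = n
    else low = 0 || low = n - 1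

-- ===== PRECONDITION & SPEC =====
-- Pre_ excludes exactly the empty string, on which A raises IndexError (word[0]).
def Pre_detectCapitalUse_character (word : String) : Prop := word ≠ ""
instance (word : String) : Decidable (Pre_detectCapitalUse_character word) := by unfold Pre_detectCapitalUse_character; infer_instance
def pvWitness_detectCapitalUse_character : String := "Google"

def Spec_detectCapitalUse_character (word : String) (out : Bool) : Prop := out = detectCapitalUse_character_alt word
instance (word : String) (out : Bool) : Decidable (Spec_detectCapitalUse_character word out) := by unfold Spec_detectCapitalUse_character; infer_instance

-- ===== CLAIM (what is proved, stated in full; the proofs are below) =====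
def Claim_equal_detectCapitalUse_character : Prop := ∀ (word : String), Dom_detectCapitalUse_character word → Pre_detectCapitalUse_character word → Spec_detectCapitalUse_character word (detectCapitalUse_character word)

-- ===== LEMMAS AND PROOFS =====

theorem pvFoldl_count (l : List Char) (a : Nat) :
    l.foldl (fun acc c => acc + (if PySem.Chars.islower c then 1 else 0)) a
      = a + l.countP (fun c => PySem.Chars.islower c) := by
  induction l generalizing a with
  | nil => simp
  | cons c rest ih =>
    simp only [List.foldl_cons, List.countP_cons, ih]
    by_cases h : PySem.Chars.islower c <;> simp [h] <;> omega

theorem pvACheck_eq_decide (rc : Bool) (l : List Char) :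
    pvACheck rc l = decide (∀ c ∈ l, PySem.Chars.islower c = rc) := by
  induction l with
  | nil => simp [pvACheck]
  | cons c rest ih =>
    by_cases h : PySem.Chars.islower c = rc <;> simp [pvACheck, h, ih]

theorem pvCount_all (l : List Char) :
    (∀ c ∈ l, PySem.Chars.islower c = true) ↔
      l.countP (fun c => PySem.Chars.islower c) = l.length := by
  rw [← List.countP_eq_length]

theorem pvCount_none (l : List Char) :
    (∀ c ∈ l, PySem.Chars.islower c = false) ↔
      l.countP (fun c => PySem.Chars.islower c) = 0 := by
  rw [List.countP_eq_zero]; simp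

theorem detectCapitalUse_eq (word : String) (h : word ≠ "") :
    detectCapitalUse_character word = detectCapitalUse_character_alt word := by
  have hne : word.toList ≠ [] := by
    intro hc; apply h; cases word; simp_all
  unfold detectCapitalUse_character detectCapitalUse_character_alt
  obtain ⟨c1, tl, hcs⟩ := List.exists_cons_of_ne_nil hne
  rw [hcs]
  cases tl with
  | nil => simp
  | cons c2 rest =>
    have hlen : rest.length + 1 + 1 ≠ 1 := by omega
    by_cases h1 : PySem.Chars.islower c1
    · have hcnt := List.countP_le_length (l := c2 :: rest) (p := fun c => PySem.Chars.islower c)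
      have hsplit : (c1 :: c2 :: rest).countP (fun c => PySem.Chars.islower c)
          = (c2 :: rest).countP (fun c => PySem.Chars.islower c) + 1 := by
        simp [List.countP_cons, h1]
      simp only [List.length_cons, if_neg hlen, List.getD_cons_zero, h1, if_true,
        List.drop_zero, List.drop_succ_cons, pvFoldl_count, Nat.zero_add,
        pvACheck_eq_decide, hsplit]
      rw [Bool.eq_iff_iff]
      simp only [decide_eq_true_eq]
      rw [pvCount_all (c2 :: rest)]
      simp only [List.length_cons] at *
      omega
    · have h1' : PySem.Chars.islower c1 = false := by simpa using h1
      have hcnt := List.countP_le_length (l := rest) (p := fun c => PySem.Chars.islower c)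
      simp only [List.length_cons, if_neg hlen, List.getD_cons_zero, h1',
        Bool.false_eq_true, if_false, List.getD_cons_succ, List.getD_cons_zero,
        List.drop_succ_cons, List.drop_zero, pvFoldl_count, Nat.zero_add,
        pvACheck_eq_decide]
      by_cases h2 : PySem.Chars.islower c2
      · have hsplit : (c1 :: c2 :: rest).countP (fun c => PySem.Chars.islower c)
            = rest.countP (fun c => PySem.Chars.islower c) + 1 := by
          simp [h1', h2]
        rw [Bool.eq_iff_iff]
        simp only [Bool.or_eq_true, decide_eq_true_eq, h2, hsplit]
        rw [pvCount_all rest]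
        omega
      · have h2' : PySem.Chars.islower c2 = false := by simpa using h2
        have hsplit : (c1 :: c2 :: rest).countP (fun c => PySem.Chars.islower c)
            = rest.countP (fun c => PySem.Chars.islower c) := by
          simp [h1', h2']
        rw [Bool.eq_iff_iff]
        simp only [Bool.or_eq_true, decide_eq_true_eq, h2', hsplit]
        rw [pvCount_none rest]
        omega

-- ===== VERDICT (by name: the statement is the Claim_ definition above) =====
theorem detectCapitalUse_character_spec : Claim_equal_detectCapitalUse_character := by
  intro word _ hpre
  exact detectCapitalUse_eq word hpre
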